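-- pv_equiv track=rewrite | github.com/Rushijaviya/30DaysofChallenge_Scaler | Python/22_Reversing the equation.py | reverseEqn
-- ===== SOURCE A (Python) =====
-- def reverseEqn(s):
--     # code here
--     ans=""
--     idx=len(s)-1
--     while idx>=0:
--         if s[idx] in '+-*/':
--             ans+=s[idx]
--             idx-=1
--         else:
--             j=idx-1
--             while j>=0 and s[j] not in '+-*/':
--                 j-=1
--             ans+=s[j+1:idx+1]
--             idx=j
--     return ans
-- ===== SOURCE B (Python) =====
-- def reverseEqn(s):
--     # single forward pass: tokenize into numbers and one-char operators,
--     # then join the token list back to front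
--     tokens = []
--     cur = []
--     for c in s:
--         if c in '+-*/':
--             tokens.append(''.join(cur))
--             tokens.append(c)
--             cur = []
--         else:
--             cur.append(c)
--     tokens.append(''.join(cur))
--     return ''.join(reversed(tokens))
-- ===== Notes on version B (the rewrite author's own statement) =====
-- stated objective: idiomatic
-- what changed: A walks the string backwards, re-scanning inside the loop to find each number group's left boundary; B tokenizes in one forward pass (numbers and single-char operators) and joins the reversed token list.
import Mathlib
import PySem

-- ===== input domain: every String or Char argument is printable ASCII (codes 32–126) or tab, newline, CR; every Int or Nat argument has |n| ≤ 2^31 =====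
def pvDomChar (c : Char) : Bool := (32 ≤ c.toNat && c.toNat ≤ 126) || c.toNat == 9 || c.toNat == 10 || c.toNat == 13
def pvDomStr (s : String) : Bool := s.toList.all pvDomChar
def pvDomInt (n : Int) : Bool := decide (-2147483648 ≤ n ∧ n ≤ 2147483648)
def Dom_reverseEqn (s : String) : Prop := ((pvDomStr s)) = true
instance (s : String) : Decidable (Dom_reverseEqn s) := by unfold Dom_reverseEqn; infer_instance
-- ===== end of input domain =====

-- B replaces A's backward index-walk (with an inner boundary scan) by a forward
-- tokenizing pass followed by reversing and joining the token list (idiomatic, same cost).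

-- ===== PORT A =====
-- `c in '+-*/'`
def pvIsOp (c : Char) : Bool := "+-*/".toList.contains c

-- inner while loop: `while j>=0 and s[j] not in '+-*/': j-=1`
-- (cs.getD j.toNat ' ' is exact for 0 ≤ j < cs.length, which the caller guarantees)
def pvFindJ (cs : List Char) (j : Int) : Int :=
  if h : 0 ≤ j then
    if pvIsOp (cs.getD j.toNat ' ') then j
    else pvFindJ cs (j - 1)
  else j
termination_by (j + 1).toNat
decreasing_by omega

theorem pvFindJ_le (cs : List Char) (j : Int) : pvFindJ cs j ≤ j := by
  unfold pvFindJ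
  split
  · split
    · exact le_refl _
    · have := pvFindJ_le cs (j - 1); omega
  · exact le_refl _
termination_by (j + 1).toNat
decreasing_by omega

-- outer while loop over idx, accumulating ans
def pvLoopA (cs : List Char) (idx : Int) (ans : List Char) : List Char :=
  if _h : 0 ≤ idx then
    if pvIsOp (cs.getD idx.toNat ' ') then
      pvLoopA cs (idx - 1) (ans ++ [cs.getD idx.toNat ' '])
    else
      let j := pvFindJ cs (idx - 1)
      pvLoopA cs j (ans ++ PySem.List.slice cs (some (j + 1)) (some (idx + 1)))
  else ans
termination_by (idx + 1).toNat
decreasing_by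
  · omega
  · have := pvFindJ_le cs (idx - 1); omega

def reverseEqn (s : String) : String :=
  String.ofList (pvLoopA s.toList ((s.toList.length : Int) - 1) [])

-- ===== PORT B =====
-- one step of the forward pass: emit current number and the operator, or extend the number
def pvStep (st : List (List Char) × List Char) (c : Char) : List (List Char) × List Char :=
  if pvIsOp c then (st.1 ++ [st.2, [c]], []) else (st.1, st.2 ++ [c])

def reverseEqn_alt (s : String) : String :=
  let st := s.toList.foldl pvStep ([], [])
  String.ofList ((st.1 ++ [st.2]).reverse.flatten)

-- ===== PRECONDITION & SPEC =====
def Spec_reverseEqn (s : String) (out : String) : Prop := out = reverseEqn_alt s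
instance (s : String) (out : String) : Decidable (Spec_reverseEqn s out) := by unfold Spec_reverseEqn; infer_instance

-- ===== CLAIM (what is proved, stated in full; the proofs are below) =====
def Claim_equal_reverseEqn : Prop := ∀ (s : String), Dom_reverseEqn s → Spec_reverseEqn s (reverseEqn s)

-- ===== LEMMAS AND PROOFS =====

-- the joined reversed token list of B, as a list of chars
def pvRevJoin (cs : List Char) : List Char :=
  (((cs.foldl pvStep ([], [])).1 ++ [(cs.foldl pvStep ([], [])).2]).reverse).flatten

-- g.foldl over non-operator chars just extends the current number
theorem pvFoldl_nonop (g : List Char) (st : List (List Char) × List Char)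
    (hg : ∀ x ∈ g, pvIsOp x = false) :
    g.foldl pvStep st = (st.1, st.2 ++ g) := by
  induction g generalizing st with
  | nil => simp
  | cons c g ih =>
    have hc : pvIsOp c = false := hg c (by simp)
    simp only [List.foldl_cons, pvStep, hc, Bool.false_eq_true, if_false]
    rw [ih _ (fun x hx => hg x (by simp [hx]))]
    simp

theorem pvSnd_concat_op (q : List Char) (c : Char) (hc : pvIsOp c = true) :
    ((q ++ [c]).foldl pvStep ([], [])).2 = [] := by
  simp [List.foldl_append, pvStep, hc]

theorem pvRevJoin_concat_op (q : List Char) (c : Char) (hc : pvIsOp c = true) :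
    pvRevJoin (q ++ [c]) = c :: pvRevJoin q := by
  simp [pvRevJoin, List.foldl_append, pvStep, hc]

theorem pvRevJoin_append_nonop (p g : List Char)
    (hp : (p.foldl pvStep ([], [])).2 = [])
    (hg : ∀ x ∈ g, pvIsOp x = false) :
    pvRevJoin (p ++ g) = g ++ pvRevJoin p := by
  simp [pvRevJoin, List.foldl_append, pvFoldl_nonop g _ hg, hp]

-- pvFindJ only looks left of its start, so appending on the right does not change it
theorem pvFindJ_append (cs ds : List Char) (j : Int) (hj : j < (cs.length : Int)) :
    pvFindJ (cs ++ ds) j = pvFindJ cs j := by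
  unfold pvFindJ
  split
  · have : j.toNat < cs.length := by omega
    rw [List.getD_append _ _ _ _ this]
    split
    · rfl
    · exact pvFindJ_append cs ds (j - 1) (by omega)
  · rfl
termination_by (j + 1).toNat
decreasing_by omega

theorem pvFindJ_ge (cs : List Char) (j : Int) (hj : -1 ≤ j) : -1 ≤ pvFindJ cs j := by
  unfold pvFindJ
  split
  · split
    · omega
    · exact pvFindJ_ge cs (j - 1) (by omega)
  · omega
termination_by (j + 1).toNat
decreasing_by omega

theorem pvFindJ_spec (cs : List Char) (j0 : Int) :
    (∀ k : Int, pvFindJ cs j0 < k → k ≤ j0 → pvIsOp (cs.getD k.toNat ' ') = false) ∧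
    (0 ≤ pvFindJ cs j0 → pvIsOp (cs.getD (pvFindJ cs j0).toNat ' ') = true) := by
  unfold pvFindJ
  split
  · rename_i h0
    split
    · rename_i hop
      exact ⟨fun k hk hk' => by omega, fun _ => hop⟩
    · rename_i hop
      obtain ⟨ih1, ih2⟩ := pvFindJ_spec cs (j0 - 1)
      refine ⟨fun k hk hk' => ?_, ih2⟩
      by_cases hkj : k ≤ j0 - 1
      · exact ih1 k hk hkj
      · have : k = j0 := by omega
        subst this
        simpa using hop
  · exact ⟨fun k hk hk' => by omega, fun h => by omega⟩
termination_by (j0 + 1).toNat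
decreasing_by omega

-- the loop only reads positions ≤ idx
theorem pvLoopA_append (cs ds : List Char) (idx : Int) (ans : List Char)
    (hidx : idx < (cs.length : Int)) :
    pvLoopA (cs ++ ds) idx ans = pvLoopA cs idx ans := by
  unfold pvLoopA
  split
  · rename_i h0
    have hlt : idx.toNat < cs.length := by omega
    rw [List.getD_append _ _ _ _ hlt]
    split
    · exact pvLoopA_append cs ds (idx - 1) _ (by omega)
    · have hj := pvFindJ_le cs (idx - 1)
      have hj' := pvFindJ_ge cs (idx - 1) (by omega)
      rw [pvFindJ_append cs ds (idx - 1) (by omega)]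
      have hs : PySem.List.slice (cs ++ ds) (some (pvFindJ cs (idx - 1) + 1)) (some (idx + 1))
          = PySem.List.slice cs (some (pvFindJ cs (idx - 1) + 1)) (some (idx + 1)) := by
        rw [PySem.List.slice_toNat _ (by omega) (by omega), PySem.List.slice_toNat _ (by omega) (by omega)]
        rw [List.drop_append_of_le_length (by omega)]
        rw [List.take_append_of_le_length (by simp; omega)]
      simp only [hs]
      exact pvLoopA_append cs ds (pvFindJ cs (idx - 1)) _ (by omega)
  · rfl
termination_by (idx + 1).toNat
decreasing_by
  · omega
  · have := pvFindJ_le cs (idx - 1); omega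

theorem pvLoopA_main_aux (n : Nat) : ∀ cs : List Char, cs.length ≤ n → ∀ ans : List Char,
    pvLoopA cs ((cs.length : Int) - 1) ans = ans ++ pvRevJoin cs := by
  induction n with
  | zero =>
    intro cs hcs ans
    have hnil : cs = [] := List.eq_nil_of_length_eq_zero (by omega)
    subst hnil
    simp [pvLoopA, pvRevJoin]
  | succ n ih =>
    intro cs hcs ans
    rcases List.eq_nil_or_concat cs with rfl | ⟨q, c, rfl⟩
    · simp [pvLoopA, pvRevJoin]
    · simp only [List.concat_eq_append] at *
      have hqn : q.length ≤ n := by simp at hcs; omega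
      have hlen : (((q ++ [c]).length : Int)) - 1 = (q.length : Int) := by simp
      rw [hlen]
      unfold pvLoopA
      rw [dif_pos (by omega : (0:Int) ≤ (q.length : Int))]
      have hget : (q ++ [c]).getD ((q.length : Int)).toNat ' ' = c := by
        simp [List.getD]
      rw [hget]
      by_cases hc : pvIsOp c = true
      · rw [if_pos hc]
        rw [pvLoopA_append q [c] ((q.length : Int) - 1) _ (by omega)]
        rw [ih q hqn (ans ++ [c])]
        rw [pvRevJoin_concat_op q c hc]
        simp
      · rw [if_neg hc]
        have hc' : pvIsOp c = false := by simpa using hc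
        have hjle := pvFindJ_le (q ++ [c]) ((q.length : Int) - 1)
        have hjge := pvFindJ_ge (q ++ [c]) ((q.length : Int) - 1) (by omega)
        obtain ⟨hfj1, hfj2⟩ := pvFindJ_spec (q ++ [c]) ((q.length : Int) - 1)
        set j := pvFindJ (q ++ [c]) ((q.length : Int) - 1) with hjdef
        set nj := (j + 1).toNat with hnjdef
        have hnj : (nj : Int) = j + 1 := by omega
        have hnjle : nj ≤ q.length := by omega
        set p := (q ++ [c]).take nj with hpdef
        set g := (q ++ [c]).drop nj with hgdef
        have hsplit : p ++ g = q ++ [c] := List.take_append_drop nj (q ++ [c])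
        have hplen : p.length = nj := by simp [hpdef]; omega
        have hglen : g.length = (q ++ [c]).length - nj := by simp [hgdef]
        -- the slice is exactly g
        have hslice : PySem.List.slice (q ++ [c]) (some (j + 1)) (some ((q.length : Int) + 1)) = g := by
          rw [PySem.List.slice_toNat _ (by omega) (by omega)]
          have h1 : (j + 1).toNat = nj := rfl
          have h2 : ((q.length : Int) + 1).toNat = (q ++ [c]).length := by simp
          rw [h1, h2, ← hgdef]
          exact List.take_of_length_le (by simp [hglen])
        -- all chars of g are non-operators
        have hgnonop : ∀ x ∈ g, pvIsOp x = false := by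
          intro x hx
          obtain ⟨m, hm, rfl⟩ := List.mem_iff_getElem.mp hx
          have hmlen : nj + m < (q ++ [c]).length := by
            rw [hglen] at hm; omega
          have hgm : g[m] = (q ++ [c])[nj + m]'hmlen := by
            simp [hgdef]
          rw [hgm]
          by_cases hmq : nj + m < q.length
          · have := hfj1 ((nj : Int) + (m : Int)) (by omega) (by omega)
            have hk : (((nj : Int) + (m : Int))).toNat = nj + m := by omega
            rw [hk] at this
            rwa [List.getD_eq_getElem _ _ hmlen] at this
          · have heq : nj + m = q.length := by simp at hmlen; omega
            have hcc : (q ++ [c])[nj + m]'hmlen = c := by simp [heq]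
            rw [hcc]; exact hc'
        -- p is empty or ends with an operator, so its running number is empty
        have hp2 : (p.foldl pvStep ([], [])).2 = [] := by
          by_cases hj0 : j < 0
          · have : nj = 0 := by omega
            simp [hpdef, this]
          · have hjnn : 0 ≤ j := by omega
            rcases List.eq_nil_or_concat p with hpe | ⟨q', c', hpc⟩
            · exfalso; rw [hpe] at hplen; simp at hplen; omega
            · simp only [List.concat_eq_append] at hpc
              have hop := hfj2 hjnn
              have hjlt : j.toNat < (q ++ [c]).length := by simp; omega
              rw [List.getD_eq_getElem _ _ hjlt] at hop
              have hpne : p ≠ [] := by rw [hpc]; simp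
              have e1 : p.getLast hpne = c' := by simp [hpc]
              have e2 : p.getLast hpne = (q ++ [c])[j.toNat]'hjlt := by
                rw [List.getLast_eq_getElem]
                simp only [hpdef, List.getElem_take]
                congr 1
                simpa [hpdef] using (by omega : p.length - 1 = j.toNat)
              rw [hpc]
              exact pvSnd_concat_op q' c' (by rw [← e1, e2]; exact hop)
        simp only [hslice]
        have hrec : pvLoopA (q ++ [c]) j (ans ++ g) = pvLoopA p j (ans ++ g) := by
          rw [← hsplit]
          exact pvLoopA_append p g j _ (by omega)
        rw [hrec]
        have hjp : j = ((p.length : Int)) - 1 := by rw [hplen]; omega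
        rw [hjp]
        rw [ih p (by omega) (ans ++ g)]
        rw [← hsplit, pvRevJoin_append_nonop p g hp2 hgnonop]
        simp

theorem pvLoopA_main (cs : List Char) (ans : List Char) :
    pvLoopA cs ((cs.length : Int) - 1) ans = ans ++ pvRevJoin cs :=
  pvLoopA_main_aux cs.length cs le_rfl ans

-- ===== VERDICT (by name: the statement is the Claim_ definition above) =====
theorem reverseEqn_spec : Claim_equal_reverseEqn := by
  intro s _
  show reverseEqn s = reverseEqn_alt s
  unfold reverseEqn reverseEqn_alt
  rw [pvLoopA_main]
  simp [pvRevJoin]
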